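-- pv_equiv track=rewrite | github.com/introduction-to-python-bsuir-2019/PythonHomework | final_task/rss_reader/format_converter.py | break_lines
-- ===== SOURCE A (Python) =====
-- def break_lines(text):
--     """
--     this function replaces '\n' to <br> tags
--     """
--     i = 0
--     while True:
--         try:
--             while text[i] != '\n':
--                 i += 1
--             text = text[:i] + "<br>" + text[i + 1:]
--             i += 4
--         except IndexError:
--             break
--
--     return text
-- ===== SOURCE B (Python) =====
-- def break_lines(text):
--     """
--     this function replaces '\n' to <br> tags
--     """
--     return "<br>".join(text.split('\n'))
-- ===== Notes on version B (the rewrite author's own statement) =====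
-- stated objective: faster
-- what changed: Replaces A's character-scan loop that resplices the whole string at every newline (IndexError-driven termination) by a single tokenize-then-rejoin pass: split on newline once and join the pieces with the tag.
import Mathlib
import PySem

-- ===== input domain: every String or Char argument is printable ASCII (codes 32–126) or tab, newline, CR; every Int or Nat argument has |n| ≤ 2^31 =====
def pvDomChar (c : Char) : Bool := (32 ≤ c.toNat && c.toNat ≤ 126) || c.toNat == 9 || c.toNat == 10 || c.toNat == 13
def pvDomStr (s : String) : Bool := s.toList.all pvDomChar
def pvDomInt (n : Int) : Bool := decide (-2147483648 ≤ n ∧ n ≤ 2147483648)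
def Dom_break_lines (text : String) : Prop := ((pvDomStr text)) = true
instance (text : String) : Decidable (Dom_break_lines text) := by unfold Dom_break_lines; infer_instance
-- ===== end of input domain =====

-- B replaces A's index-scanning splice loop by split-on-'\n' then join with "<br>" (idiomatic decomposition).


-- ===== PORT A =====
-- A's while-True loop: scan from i for the next '\n' (IndexError = stop), splice in "<br>", continue at i+4.
def pvBr : List Char := ['<', 'b', 'r', '>']

-- fuel = len(text)+1 bounds the loop (each step consumes one character position); it only makes the recursion structural.
def breakLinesGo : Nat → List Char → Nat → List Char
  | 0, cs, _ => cs
  | fuel + 1, cs, i =>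
    match PySem.List.pyGet? cs (i : Int) with
    | none => cs          -- IndexError: break
    | some c =>
      if c = '\n' then
        -- text = text[:i] + "<br>" + text[i+1:]; i += 4
        breakLinesGo fuel (PySem.List.slice cs none (some (i : Int)) ++ pvBr ++
                           PySem.List.slice cs (some ((i : Int) + 1)) none) (i + 4)
      else
        breakLinesGo fuel cs (i + 1)

def break_lines (text : String) : String :=
  String.ofList (breakLinesGo (text.toList.length + 1) text.toList 0)

-- ===== PORT B =====
-- Source B: "<br>".join(text.split('\n'))
def break_lines_alt (text : String) : String :=
  String.ofList (PySem.Chars.join "<br>".toList (PySem.Chars.splitOn text.toList ['\n']))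

-- ===== PRECONDITION & SPEC =====
def Spec_break_lines (text : String) (out : String) : Prop := out = break_lines_alt text
instance (text : String) (out : String) : Decidable (Spec_break_lines text out) := by unfold Spec_break_lines; infer_instance

-- ===== CLAIM (what is proved, stated in full; the proofs are below) =====
def Claim_equal_break_lines : Prop := ∀ (text : String), Dom_break_lines text → Spec_break_lines text (break_lines text)

-- ===== LEMMAS AND PROOFS =====

-- the common value: every '\n' replaced by "<br>"
def pvRepl : List Char → List Char
  | [] => []
  | c :: cs => if c = '\n' then pvBr ++ pvRepl cs else c :: pvRepl cs

-- splitting on '\n', structurally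
def pvSplitNl : List Char → List (List Char)
  | [] => [[]]
  | c :: cs =>
    if c = '\n' then [] :: pvSplitNl cs
    else
      match pvSplitNl cs with
      | [] => [[c]]
      | p :: ps => (c :: p) :: ps

def pvMapHead (f : List Char → List Char) : List (List Char) → List (List Char)
  | [] => []
  | p :: ps => f p :: ps

lemma pvSplitNl_ne_nil (cs : List Char) : pvSplitNl cs ≠ [] := by
  cases cs with
  | nil => simp [pvSplitNl]
  | cons c cs =>
    simp only [pvSplitNl]
    split_ifs
    · simp
    · cases h : pvSplitNl cs <;> simp

lemma breakLinesGo_eq (fuel : Nat) : ∀ (cs : List Char) (i : Nat), cs.length - i < fuel →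
    breakLinesGo fuel cs i = cs.take i ++ pvRepl (cs.drop i) := by
  induction fuel with
  | zero => intro cs i h; omega
  | succ fuel ih =>
    intro cs i hfuel
    cases h : PySem.List.pyGet? cs (i : Int) with
    | none =>
      have hi : cs.length ≤ i := by
        by_contra hlt
        rw [PySem.List.pyGet?_natCast, List.getElem?_eq_getElem (by omega)] at h
        simp at h
      simp [breakLinesGo, h, List.take_of_length_le hi, List.drop_of_length_le hi, pvRepl]
    | some c =>
      have hi : i < cs.length := by
        by_contra hle
        rw [PySem.List.pyGet?_natCast, List.getElem?_eq_none (by omega)] at h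
        simp at h
      have hcs : cs[i] = c := by
        rw [PySem.List.pyGet?_natCast, List.getElem?_eq_getElem hi] at h
        exact Option.some.inj h
      have h1 : ((i : Int) + 1) = ((i + 1 : Nat) : Int) := by push_cast; ring
      rw [show breakLinesGo (fuel + 1) cs i =
            (if c = '\n' then
              breakLinesGo fuel (PySem.List.slice cs none (some (i : Int)) ++ pvBr ++
                PySem.List.slice cs (some ((i : Int) + 1)) none) (i + 4)
             else breakLinesGo fuel cs (i + 1)) by rw [breakLinesGo, h]]
      by_cases hc : c = '\n'
      · rw [if_pos hc]
        rw [h1, PySem.List.slice_to_natCast, PySem.List.slice_from_natCast]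
        have htl : (cs.take i ++ pvBr).length = i + 4 := by
          simp [pvBr]; omega
        rw [ih (cs.take i ++ pvBr ++ cs.drop (i + 1)) (i + 4)
            (by simp [pvBr]; omega)]
        rw [List.take_left' htl, List.drop_left' htl]
        have hdropi : cs.drop i = '\n' :: cs.drop (i + 1) := by
          rw [List.drop_eq_getElem_cons hi, hcs, hc]
        rw [hdropi]
        simp [pvRepl]
      · rw [if_neg hc]
        rw [ih cs (i + 1) (by omega)]
        have hdropi : cs.drop i = c :: cs.drop (i + 1) := by
          rw [List.drop_eq_getElem_cons hi, hcs]
        rw [hdropi, List.take_add_one, List.getElem?_eq_getElem hi, hcs]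
        simp [pvRepl, hc]

lemma splitOn_go_eq (fuel : Nat) : ∀ (l cur : List Char) (accs : List (List Char)),
    l.length ≤ fuel →
    PySem.Chars.splitOn.go ['\n'] fuel l cur accs =
      accs.reverse ++ pvMapHead (cur.reverse ++ ·) (pvSplitNl l) := by
  induction fuel with
  | zero =>
    intro l cur accs hl
    have : l = [] := List.eq_nil_of_length_eq_zero (by omega)
    subst this
    simp [PySem.Chars.splitOn.go, pvSplitNl, pvMapHead]
  | succ fuel ih =>
    intro l cur accs hl
    cases l with
    | nil => simp [PySem.Chars.splitOn.go, pvSplitNl, pvMapHead]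
    | cons c rest =>
      rw [PySem.Chars.splitOn.go]
      by_cases hc : c = '\n'
      · subst hc
        rw [if_pos (by simp [List.isPrefixOf])]
        rw [show List.drop (['\n'] : List Char).length ('\n' :: rest) = rest by simp]
        rw [ih rest [] (cur.reverse :: accs) (by simpa using Nat.lt_succ_iff.mp (by simpa using hl))]
        simp only [pvSplitNl, if_true]
        cases hs : pvSplitNl rest with
        | nil => exact absurd hs (pvSplitNl_ne_nil rest)
        | cons p ps => simp [pvMapHead]
      · rw [if_neg (by simp [List.isPrefixOf]; exact fun hh => hc hh.symm)]
        rw [ih rest (c :: cur) accs (by simpa using Nat.lt_succ_iff.mp (by simpa using hl))]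
        simp only [pvSplitNl, if_neg hc]
        cases hs : pvSplitNl rest with
        | nil => exact absurd hs (pvSplitNl_ne_nil rest)
        | cons p ps => simp [pvMapHead]

lemma pvMapHead_id (l : List (List Char)) : pvMapHead (fun p => p) l = l := by
  cases l <;> simp [pvMapHead]

lemma splitOn_eq (cs : List Char) :
    PySem.Chars.splitOn cs ['\n'] = pvSplitNl cs := by
  rw [PySem.Chars.splitOn, splitOn_go_eq (cs.length + 1) cs [] [] (by omega)]
  simp only [List.reverse_nil, List.nil_append]
  exact pvMapHead_id _

lemma join_splitNl (cs : List Char) :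
    PySem.Chars.join pvBr (pvSplitNl cs) = pvRepl cs := by
  induction cs with
  | nil => simp [pvSplitNl, pvRepl, PySem.Chars.join, List.intercalate]
  | cons c cs ih =>
    by_cases hc : c = '\n'
    · subst hc
      simp only [pvSplitNl, if_true]
      cases hs : pvSplitNl cs with
      | nil => exact absurd hs (pvSplitNl_ne_nil cs)
      | cons p ps =>
        rw [hs] at ih
        simp only [pvRepl, if_true, ← ih]
        simp [PySem.Chars.join, List.intercalate]
    · simp only [pvSplitNl, if_neg hc]
      cases hs : pvSplitNl cs with
      | nil => exact absurd hs (pvSplitNl_ne_nil cs)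
      | cons p ps =>
        rw [hs] at ih
        simp only [pvRepl, if_neg hc, ← ih]
        cases ps <;> simp [PySem.Chars.join, List.intercalate, List.intersperse]

-- ===== VERDICT (by name: the statement is the Claim_ definition above) =====
theorem break_lines_spec : Claim_equal_break_lines := by
  intro text _
  unfold Spec_break_lines break_lines break_lines_alt
  rw [splitOn_eq]
  have : "<br>".toList = pvBr := by decide
  rw [this, join_splitNl, breakLinesGo_eq _ _ _ (by omega)]
  simp
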